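-- pv_equiv track=rewrite | github.com/ThomasHoek/AdventsOfCode | 2015/day25/day25.py | get_arr_size
-- ===== SOURCE A (Python) =====
-- def get_arr_size(x_loc: int, y_loc: int) -> int:
--     loc = 1
--
--     x_cur = 1
--     if x_loc > 1:
--         for add_x in range(1, x_loc):
--             loc += add_x
--             x_cur += 1
--
--     if y_loc > 1:
--         for add_y in range(1, y_loc):
--             loc += x_cur + add_y
--
--     return loc
-- ===== SOURCE B (Python) =====
-- def get_arr_size(x_loc: int, y_loc: int) -> int:
--     # closed form: O(1) instead of O(x+y) loops
--     xx = x_loc if x_loc > 1 else 1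
--     yy = y_loc if y_loc > 1 else 1
--     return 1 + (xx - 1) * xx // 2 + xx * (yy - 1) + (yy - 1) * yy // 2
-- ===== Notes on version B (the rewrite author's own statement) =====
-- stated objective: faster
-- what changed: Replaces the two O(x+y) accumulation loops with the closed-form triangular-number formula 1 + (x'-1)x'/2 + x'(y'-1) + (y'-1)y'/2 (x', y' clamped to at least 1).
import Mathlib
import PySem

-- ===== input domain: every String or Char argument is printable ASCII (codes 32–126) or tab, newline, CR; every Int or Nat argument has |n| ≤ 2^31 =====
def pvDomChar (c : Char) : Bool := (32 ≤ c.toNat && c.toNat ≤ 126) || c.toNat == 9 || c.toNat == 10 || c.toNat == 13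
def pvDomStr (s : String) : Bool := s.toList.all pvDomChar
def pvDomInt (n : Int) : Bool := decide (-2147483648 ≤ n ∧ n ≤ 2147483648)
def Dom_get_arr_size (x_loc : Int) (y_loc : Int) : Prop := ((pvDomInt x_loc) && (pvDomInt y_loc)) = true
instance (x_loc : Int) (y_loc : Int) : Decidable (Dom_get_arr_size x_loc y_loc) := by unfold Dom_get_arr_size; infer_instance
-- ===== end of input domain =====

-- B replaces A's two accumulation loops by the closed-form triangular-number formula (O(1) vs O(x+y)).
-- ===== PORT A =====
def get_arr_size (x_loc : Int) (y_loc : Int) : Int :=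
  let loc : Int := 1
  let x_cur : Int := 1
  let st :=
    if x_loc > 1 then
      (PySem.List.pyRange 1 x_loc 1).foldl
        (fun (s : Int × Int) add_x => (s.1 + add_x, s.2 + 1)) (loc, x_cur)
    else (loc, x_cur)
  let loc := st.1
  let x_cur := st.2
  let loc :=
    if y_loc > 1 then
      (PySem.List.pyRange 1 y_loc 1).foldl (fun l add_y => l + (x_cur + add_y)) loc
    else loc
  loc

-- ===== PORT B =====
def get_arr_size_alt (x_loc : Int) (y_loc : Int) : Int :=
  let xx := if x_loc > 1 then x_loc else 1
  let yy := if y_loc > 1 then y_loc else 1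
  1 + PySem.Int.floordiv ((xx - 1) * xx) 2 + xx * (yy - 1)
    + PySem.Int.floordiv ((yy - 1) * yy) 2

-- ===== PRECONDITION & SPEC =====
def Spec_get_arr_size (x_loc : Int) (y_loc : Int) (out : Int) : Prop := out = get_arr_size_alt x_loc y_loc
instance (x_loc : Int) (y_loc : Int) (out : Int) : Decidable (Spec_get_arr_size x_loc y_loc out) := by unfold Spec_get_arr_size; infer_instance

-- ===== CLAIM (what is proved, stated in full; the proofs are below) =====
def Claim_equal_get_arr_size : Prop := ∀ (x_loc : Int) (y_loc : Int), Dom_get_arr_size x_loc y_loc → Spec_get_arr_size x_loc y_loc (get_arr_size x_loc y_loc)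

-- ===== LEMMAS AND PROOFS =====

theorem tri_step (n : Int) : n * (n + 1) / 2 = (n - 1) * n / 2 + n := by
  have h : n * (n + 1) = (n - 1) * n + n * 2 := by ring
  rw [h, Int.add_mul_ediv_right _ _ (by norm_num : (2:Int) ≠ 0)]

theorem loop1_eq (m : Nat) (l c : Int) :
    (PySem.List.pyRange 1 (1 + (m : Int)) 1).foldl
      (fun (s : Int × Int) a => (s.1 + a, s.2 + 1)) (l, c)
    = (l + (m : Int) * ((m : Int) + 1) / 2, c + (m : Int)) := by
  induction m generalizing l c with
  | zero => simp [PySem.List.pyRange]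
  | succ k ih =>
    have hsplit := PySem.List.pyRange_one_succ_right (a := 1) (b := 1 + (k : Int))
      (by omega)
    have hb : (1 : Int) + ((k + 1 : Nat) : Int) = (1 + (k : Int)) + 1 := by push_cast; ring
    rw [hb, hsplit, List.foldl_append, ih]
    simp only [List.foldl_cons, List.foldl_nil]
    refine Prod.ext ?_ ?_
    · show l + (k : Int) * ((k : Int) + 1) / 2 + (1 + (k : Int))
        = l + ((k + 1 : Nat) : Int) * (((k + 1 : Nat) : Int) + 1) / 2
      have h := tri_step ((k : Int) + 1)
      push_cast
      ring_nf
      ring_nf at h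
      omega
    · push_cast; ring

theorem loop2_eq (m : Nat) (xc : Int) (l : Int) :
    (PySem.List.pyRange 1 (1 + (m : Int)) 1).foldl (fun acc a => acc + (xc + a)) l
    = l + xc * (m : Int) + (m : Int) * ((m : Int) + 1) / 2 := by
  induction m generalizing l with
  | zero => simp [PySem.List.pyRange]
  | succ k ih =>
    have hsplit := PySem.List.pyRange_one_succ_right (a := 1) (b := 1 + (k : Int))
      (by omega)
    have hb : (1 : Int) + ((k + 1 : Nat) : Int) = (1 + (k : Int)) + 1 := by push_cast; ring
    rw [hb, hsplit, List.foldl_append, ih]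
    simp only [List.foldl_cons, List.foldl_nil]
    have h := tri_step ((k : Int) + 1)
    push_cast
    ring_nf
    ring_nf at h
    omega


-- ===== VERDICT (by name: the statement is the Claim_ definition above) =====
theorem get_arr_size_spec : Claim_equal_get_arr_size := by
  intro x y _
  unfold Spec_get_arr_size get_arr_size get_arr_size_alt
  dsimp only
  rw [PySem.Int.floordiv_eq_ediv_of_pos (by norm_num : (0:Int) < 2),
      PySem.Int.floordiv_eq_ediv_of_pos (by norm_num : (0:Int) < 2)]
  by_cases hx : x > 1 <;> by_cases hy : y > 1 <;>
    simp only [hx, hy, if_true, if_false]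
  · have hm : x = 1 + ((x - 1).toNat : Int) := by omega
    have hn : y = 1 + ((y - 1).toNat : Int) := by omega
    rw [hm, loop1_eq, hn, loop2_eq]
    have h1 : (((x - 1).toNat : Int)) = x - 1 := by omega
    have h2 : (((y - 1).toNat : Int)) = y - 1 := by omega
    rw [h1, h2]
    have e1 : (x - 1) * (x - 1 + 1) = (x - 1) * x := by ring
    have e2 : (y - 1) * (y - 1 + 1) = (y - 1) * y := by ring
    rw [e1, e2]; ring_nf
  · have hm : x = 1 + ((x - 1).toNat : Int) := by omega
    rw [hm, loop1_eq]
    have h1 : (((x - 1).toNat : Int)) = x - 1 := by omega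
    rw [h1]
    have e1 : (x - 1) * (x - 1 + 1) = (x - 1) * x := by ring
    rw [e1]; ring_nf
  · have hn : y = 1 + ((y - 1).toNat : Int) := by omega
    rw [hn, loop2_eq]
    have h2 : (((y - 1).toNat : Int)) = y - 1 := by omega
    rw [h2]
    have e2 : (y - 1) * (y - 1 + 1) = (y - 1) * y := by ring
    rw [e2]; ring_nf
  · norm_num
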